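-- pv_equiv track=rewrite | github.com/zgwuthu/MOSAIC | mutation_less_than_10_part2.py | find_best_alignment
-- ===== SOURCE A (Python) =====
-- from typing import Dict, List, Tuple, Set
--
-- def find_best_alignment(gene_seq: str, read_seq: str) -> Tuple[int, int]:
--     """Find best alignment position for gene sequence in read sequence"""
--     gene_len = len(gene_seq)
--     read_len = len(read_seq)
--
--     # If read is shorter than gene, cannot align
--     if read_len < gene_len:
--         return 0, 0
--
--     best_score = 0
--     best_start = 0
--
--     # Slide window to find best match position
--     for start in range(0, read_len - gene_len + 1):
--         end = start + gene_len
--         window = read_seq[start:end]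
--
--         # Calculate match score
--         score = sum(1 for a, b in zip(gene_seq, window) if a == b)
--
--         if score > best_score:
--             best_score = score
--             best_start = start
--
--     return best_start, best_score
-- ===== SOURCE B (Python) =====
-- def _first_at_least(plist, x):
--     """Index of the first element of the ascending list plist that is >= x (hand-written bisect_left)."""
--     lo, hi = 0, len(plist)
--     while lo < hi:
--         mid = (lo + hi) // 2
--         if plist[mid] < x:
--             lo = mid + 1
--         else:
--             hi = mid
--     return lo
--
--
-- def find_best_alignment(gene_seq, read_seq):
--     """Index the gene's character positions once; one pass over the read in which every
--     matching (gene position, read position) pair with an in-range offset votes for that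
--     offset; then take the first offset with the maximal count."""
--     gene_len = len(gene_seq)
--     read_len = len(read_seq)
--     if read_len < gene_len:
--         return 0, 0
--     max_start = read_len - gene_len
--     pos = {}
--     for i, c in enumerate(gene_seq):
--         pos[c] = pos.get(c, [])
--         pos[c].append(i)
--     counts = {}
--     for j, c in enumerate(read_seq):
--         plist = pos.get(c, [])
--         t = _first_at_least(plist, j - max_start)
--         while t < len(plist):
--             i = plist[t]
--             if i > j:
--                 break
--             start = j - i
--             counts[start] = counts.get(start, 0) + 1
--             t += 1
--     best_start = 0
--     best_score = 0
--     for start in range(0, max_start + 1):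
--         score = counts.get(start, 0)
--         if score > best_score:
--             best_score = score
--             best_start = start
--     return best_start, best_score
-- ===== Notes on version B (the rewrite author's own statement) =====
-- stated objective: alternative
-- what changed: Instead of re-scoring every window by scanning all gene_len characters, B builds a per-character position index of the gene once and makes one pass over the read in which each matching (gene position, read position) character pair inside the offset window (located by a hand-written binary search) votes for its offset in a counter; the final scan picks the first offset with the maximal count. …
import Mathlib
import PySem

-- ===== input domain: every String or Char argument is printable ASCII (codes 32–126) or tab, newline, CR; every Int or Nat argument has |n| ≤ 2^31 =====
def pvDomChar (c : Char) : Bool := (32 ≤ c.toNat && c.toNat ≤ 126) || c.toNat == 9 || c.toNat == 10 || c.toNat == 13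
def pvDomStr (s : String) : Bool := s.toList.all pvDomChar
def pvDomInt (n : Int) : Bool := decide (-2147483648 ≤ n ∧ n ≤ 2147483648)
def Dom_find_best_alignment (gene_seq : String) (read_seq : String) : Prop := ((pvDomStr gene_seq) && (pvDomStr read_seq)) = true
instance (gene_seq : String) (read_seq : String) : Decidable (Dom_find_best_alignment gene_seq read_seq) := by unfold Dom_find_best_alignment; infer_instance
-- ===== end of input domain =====

-- B replaces A's rescan of every window by a per-character position index of the gene and
-- one counting pass over the read (each in-window matching character pair, located via a
-- hand-written binary search, votes for its offset); objective: alternative algorithm,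
-- work proportional to in-window matches instead of uniform window rescans (not measured faster).

-- ===== PORT A =====
def find_best_alignment (gene_seq : String) (read_seq : String) : Int × Int :=
  let g := gene_seq.toList
  let r := read_seq.toList
  let gene_len := g.length
  let read_len := r.length
  if read_len < gene_len then (0, 0)
  else
    (PySem.List.pyRange 0 ((read_len : Int) - (gene_len : Int) + 1) 1).foldl
      (fun bs start =>
        let window := PySem.List.slice r (some start) (some (start + (gene_len : Int)))
        let score : Int := ((g.zip window).map (fun p => if p.1 == p.2 then (1 : Int) else 0)).sum
        if score > bs.2 then (start, score) else bs)
      ((0 : Int), (0 : Int))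

-- ===== PORT B =====
-- B-side helper: _first_at_least's while loop (lo, hi, mid are list indices, hence Nat;
-- Python's (lo + hi) // 2 on nonnegatives is Nat division; plist[mid] is exact as getD
-- because 0 ≤ lo ≤ mid < hi ≤ len(plist) inside the loop)
def pvFirstAtLeastLoop (plist : List Int) (x : Int) (lo hi : Nat) : Nat :=
  if h : lo < hi then
    let mid := (lo + hi) / 2
    if plist.getD mid 0 < x then pvFirstAtLeastLoop plist x (mid + 1) hi
    else pvFirstAtLeastLoop plist x lo mid
  else lo
termination_by hi - lo
decreasing_by all_goals omega

-- B-side helper: _first_at_least(plist, x)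
def pvFirstAtLeast (plist : List Int) (x : Int) : Nat :=
  pvFirstAtLeastLoop plist x 0 plist.length

-- B-side helper: the inner while loop over plist starting at index t
-- (plist[t] is exact as getD because t < len(plist) is checked first)
def pvScan (plist : List Int) (j : Int) (d : PySem.Dict Int Int) (t : Nat) : PySem.Dict Int Int :=
  if h : t < plist.length then
    let i := plist.getD t 0
    if i > j then d
    else pvScan plist j (d.insert (j - i) (d.getD (j - i) 0 + 1)) (t + 1)
  else d
termination_by plist.length - t
decreasing_by omega

def find_best_alignment_alt (gene_seq : String) (read_seq : String) : Int × Int :=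
  let g := gene_seq.toList
  let r := read_seq.toList
  let gene_len := g.length
  let read_len := r.length
  if read_len < gene_len then (0, 0)
  else
    let max_start : Int := (read_len : Int) - (gene_len : Int)
    let pos : PySem.Dict Char (List Int) :=
      (PySem.List.enumerate g).foldl
        (fun d ic => d.insert ic.2 (d.getD ic.2 [] ++ [ic.1])) PySem.Dict.empty
    let counts : PySem.Dict Int Int :=
      (PySem.List.enumerate r).foldl
        (fun d jc =>
          let plist := pos.getD jc.2 []
          pvScan plist jc.1 d (pvFirstAtLeast plist (jc.1 - max_start)))
        PySem.Dict.empty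
    (PySem.List.pyRange 0 (max_start + 1) 1).foldl
      (fun bs start =>
        let score := counts.getD start 0
        if score > bs.2 then (start, score) else bs)
      ((0 : Int), (0 : Int))

-- ===== PRECONDITION & SPEC =====
def Spec_find_best_alignment (gene_seq : String) (read_seq : String) (out : Int × Int) : Prop := out = find_best_alignment_alt gene_seq read_seq
instance (gene_seq : String) (read_seq : String) (out : Int × Int) : Decidable (Spec_find_best_alignment gene_seq read_seq out) := by unfold Spec_find_best_alignment; infer_instance

-- ===== CLAIM (what is proved, stated in full; the proofs are below) =====
def Claim_equal_find_best_alignment : Prop := ∀ (gene_seq : String) (read_seq : String), Dom_find_best_alignment gene_seq read_seq → Spec_find_best_alignment gene_seq read_seq (find_best_alignment gene_seq read_seq)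

-- ===== LEMMAS AND PROOFS =====

-- the inner loop of B's counting pass: folding the matching gene positions for one read
-- position j bumps the counter of key s by the number of occurrences of j - s in the list
lemma inner_getD (M j : Int) (l : List Int) (d : PySem.Dict Int Int) (s : Int) :
    (l.foldl (fun d i =>
        let start := j - i
        if 0 ≤ start ∧ start ≤ M then d.insert start (d.getD start 0 + 1) else d) d).getD s 0
      = d.getD s 0 + (if 0 ≤ s ∧ s ≤ M then (l.count (j - s) : Int) else 0) := by
  induction l generalizing d with
  | nil => simp
  | cons i l ih =>
    simp only [List.foldl_cons, List.count_cons, ih, beq_iff_eq]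
    by_cases hc : 0 ≤ j - i ∧ j - i ≤ M
    · simp only [if_pos hc, PySem.Dict.getD_insert]
      by_cases hsi : s = j - i
      · subst hsi
        rw [if_pos rfl, if_pos hc, if_pos hc, if_pos (show i = j - (j - i) by omega)]
        push_cast
        ring
      · rw [if_neg hsi]
        have h3 : ¬ (i = j - s) := by omega
        simp [h3]
    · simp only [if_neg hc]
      by_cases hs : 0 ≤ s ∧ s ≤ M
      · have h3 : ¬ (i = j - s) := by omega
        simp [hs, h3]
      · simp [hs]

-- B's counting pass: pointwise value of the counter dict
lemma outer_getD (M : Int) (P : PySem.Dict Char (List Int)) (L : List (Int × Char))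
    (d : PySem.Dict Int Int) (s : Int) :
    (L.foldl (fun d jc =>
        (P.getD jc.2 []).foldl
          (fun d i =>
            let start := jc.1 - i
            if 0 ≤ start ∧ start ≤ M then d.insert start (d.getD start 0 + 1) else d) d) d).getD s 0
      = d.getD s 0 + (if 0 ≤ s ∧ s ≤ M then
          ((L.map (fun jc => ((P.getD jc.2 []).count (jc.1 - s) : Int))).sum) else 0) := by
  induction L generalizing d with
  | nil => simp
  | cons jc L ih =>
    simp only [List.foldl_cons, List.map_cons, List.sum_cons, ih, inner_getD]
    by_cases hs : 0 ≤ s ∧ s ≤ M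
    · simp [hs]; ring
    · simp [hs]

-- B's gene index: the positions stored for a character c are exactly the gene positions holding c
lemma pos_getD (g : List Char) (c : Char) :
    (((PySem.List.enumerate g).foldl
        (fun d ic => d.insert ic.2 (d.getD ic.2 [] ++ [ic.1])) PySem.Dict.empty).getD c [])
      = ((PySem.List.enumerate g).filter (fun ic => ic.2 == c)).map (fun ic => ic.1) := by
  have h : ((PySem.List.enumerate g).foldl
        (fun d ic => d.insert ic.2 (d.getD ic.2 [] ++ [ic.1])) PySem.Dict.empty)
      = (((PySem.List.enumerate g).map (fun ic => (ic.2, ic.1))).foldl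
          (fun d p => d.modify p.1 [] (fun x => x ++ [p.2])) PySem.Dict.empty) := by
    rw [List.foldl_map]; rfl
  rw [h, PySem.Dict.getD_foldl_modify_append]
  simp [List.filter_map, Function.comp_def, List.map_map]

-- counting an offset in the stored position list is a character comparison
lemma pos_count (g : List Char) (c : Char) (x : Int) :
    ((((PySem.List.enumerate g).filter (fun ic => ic.2 == c)).map (fun ic => ic.1)).count x)
      = if 0 ≤ x ∧ x < (g.length : Int) ∧ PySem.List.pyGetD g x ' ' == c then 1 else 0 := by
  have hnd : ((((PySem.List.enumerate g).filter (fun ic => ic.2 == c)).map (fun ic => ic.1))).Nodup := by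
    refine List.Pairwise.imp (fun h => ne_of_lt h)
      ((List.pairwise_map).2 ((PySem.List.pairwise_lt_enumerate g 0).filter _))
  rw [hnd.count]
  have hmem : x ∈ (((PySem.List.enumerate g).filter (fun ic => ic.2 == c)).map (fun ic => ic.1))
      ↔ (0 ≤ x ∧ x < (g.length : Int) ∧ PySem.List.pyGetD g x ' ' == c) := by
    constructor
    · rintro hx
      obtain ⟨ic, hic, rfl⟩ := List.mem_map.1 hx
      obtain ⟨hienum, hcc⟩ := List.mem_filter.1 hic
      obtain ⟨k, hk, rfl⟩ := (PySem.List.mem_enumerate_iff g 0 ic).1 hienum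
      refine ⟨by simp, by simpa using hk, ?_⟩
      rw [show ((0 : Int) + (k : Int), g[k]).1 = ((k : Nat) : Int) by simp,
        PySem.List.pyGetD_eq_getElem g ' ' (by positivity) (by simpa using hk)]
      simpa using hcc
    · rintro ⟨hx0, hxl, hxc⟩
      refine List.mem_map.2 ⟨((x.toNat : Int), g[x.toNat]'(by omega)), List.mem_filter.2 ⟨?_, ?_⟩, by omega⟩
      · exact (PySem.List.mem_enumerate_iff g 0 _).2 ⟨x.toNat, by omega, by simp [Int.toNat_of_nonneg hx0]⟩
      · have hg : PySem.List.pyGetD g x ' ' = g[x.toNat]'(by omega) :=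
          PySem.List.pyGetD_eq_getElem g ' ' hx0 (by omega)
        simpa [← hg] using hxc
  rw [if_congr hmem rfl rfl]

-- one matching (gene position, read position) pair, seen from the read side
def pvBigterm (g : List Char) (s : Int) (jc : Int × Char) : Int :=
  if 0 ≤ jc.1 - s ∧ jc.1 - s < (g.length : Int) ∧ PySem.List.pyGetD g (jc.1 - s) ' ' == jc.2
  then 1 else 0

-- the window chunk of the counting sum is A's zip score over the window
lemma window_sum (g : List Char) (s : Int) (W : List Char) : ∀ (t : Nat), t + W.length ≤ g.length →
    ((PySem.List.enumerate W (s + (t : Int))).map (pvBigterm g s)).sum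
      = (((g.drop t).zip W).map (fun p => if p.1 == p.2 then (1 : Int) else 0)).sum := by
  unfold pvBigterm
  induction W with
  | nil => intro t ht; simp
  | cons w W ih =>
    intro t ht
    have htl : t < g.length := by simp at ht; omega
    rw [PySem.List.enumerate_cons, List.drop_eq_getElem_cons htl]
    simp only [List.map_cons, List.sum_cons, List.zip_cons_cons]
    have harg : s + (t : Int) + 1 = s + ((t + 1 : Nat) : Int) := by push_cast; ring
    have ht' : t + 1 + W.length ≤ g.length := by simp at ht; omega
    rw [harg, ih (t + 1) ht']
    congr 1
    have hcond : (0 ≤ s + (t : Int) - s ∧ s + (t : Int) - s < (g.length : Int) ∧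
        PySem.List.pyGetD g (s + (t : Int) - s) ' ' == w) ↔ (g[t] == w) = true := by
      rw [show s + (t : Int) - s = ((t : Nat) : Int) by ring,
        PySem.List.pyGetD_eq_getElem g ' ' (by positivity) (by simpa using htl)]
      simp [htl]
    rw [if_congr hcond rfl rfl]

-- B's counter at an admissible start equals A's window score there
lemma counts_eq_score (g r : List Char) (s : Int)
    (hs0 : 0 ≤ s) (hsM : s ≤ (r.length : Int) - (g.length : Int)) :
    (((PySem.List.enumerate r).foldl
        (fun d jc =>
          ((((PySem.List.enumerate g).foldl
              (fun d ic => d.insert ic.2 (d.getD ic.2 [] ++ [ic.1])) PySem.Dict.empty)).getD jc.2 []).foldl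
            (fun d i =>
              let start := jc.1 - i
              if 0 ≤ start ∧ start ≤ (r.length : Int) - (g.length : Int) then
                d.insert start (d.getD start 0 + 1)
              else d)
            d)
        PySem.Dict.empty).getD s 0)
      = ((g.zip (PySem.List.slice r (some s) (some (s + (g.length : Int))))).map
          (fun p => if p.1 == p.2 then (1 : Int) else 0)).sum := by
  have hs'm : s.toNat ≤ r.length := by omega
  have hA : (r.take s.toNat).length = s.toNat := by simp; omega
  have hWlen : ((r.drop s.toNat).take g.length).length = g.length := by simp; omega
  rw [outer_getD, PySem.Dict.getD_empty, if_pos ⟨hs0, hsM⟩]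
  have hmap : (PySem.List.enumerate r).map
        (fun jc => ((((((PySem.List.enumerate g).foldl
            (fun d ic => d.insert ic.2 (d.getD ic.2 [] ++ [ic.1])) PySem.Dict.empty)).getD jc.2 []).count (jc.1 - s) : Int)))
      = (PySem.List.enumerate r).map (pvBigterm g s) := by
    refine List.map_congr_left (fun jc _ => ?_)
    rw [pos_getD, pos_count]
    unfold pvBigterm
    split_ifs <;> simp
  rw [hmap]
  have hr : r.take s.toNat ++ (((r.drop s.toNat).take g.length) ++ (r.drop s.toNat).drop g.length) = r := by
    rw [List.take_append_drop, List.take_append_drop]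
  conv_lhs => rw [← hr]
  rw [PySem.List.enumerate_append, PySem.List.enumerate_append, List.map_append, List.map_append,
    List.sum_append, List.sum_append]
  have hzero1 : ((PySem.List.enumerate (r.take s.toNat) 0).map (pvBigterm g s)).sum = 0 := by
    refine List.sum_eq_zero ?_
    intro x hx
    obtain ⟨jc, hjc, rfl⟩ := List.mem_map.1 hx
    obtain ⟨k, hk, rfl⟩ := (PySem.List.mem_enumerate_iff _ _ _).1 hjc
    have hk' : k < s.toNat := by simpa [hA] using hk
    unfold pvBigterm
    refine if_neg (fun h => ?_)
    have := h.1
    simp at this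
    omega
  have hzero2 : ((PySem.List.enumerate ((r.drop s.toNat).drop g.length)
        (0 + ((r.take s.toNat).length : Int) + (((r.drop s.toNat).take g.length).length : Int))).map
        (pvBigterm g s)).sum = 0 := by
    refine List.sum_eq_zero ?_
    intro x hx
    obtain ⟨jc, hjc, rfl⟩ := List.mem_map.1 hx
    obtain ⟨k, hk, rfl⟩ := (PySem.List.mem_enumerate_iff _ _ _).1 hjc
    unfold pvBigterm
    refine if_neg (fun h => ?_)
    have := h.2.1
    simp [hA, hWlen] at this
    omega
  have hstart : (0 : Int) + ((r.take s.toNat).length : Int) = s + ((0 : Nat) : Int) := by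
    simp [hA]; omega
  rw [hzero1, hzero2, hstart, window_sum g s _ 0 (by simp [hWlen])]
  rw [PySem.List.slice_toNat r hs0 (by omega),
    show (s + (g.length : Int)).toNat - s.toNat = g.length by omega, List.drop_zero]
  simp

-- the binary search returns the boundary between the elements < x and those ≥ x (ascending list)
lemma firstAtLeastLoop_spec (plist : List Int) (x : Int)
    (hs : ∀ k1 k2, k1 < k2 → k2 < plist.length → plist.getD k1 0 < plist.getD k2 0) :
    ∀ (fuel lo hi : Nat), hi - lo ≤ fuel → lo ≤ hi → hi ≤ plist.length →
    (∀ k, k < lo → plist.getD k 0 < x) →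
    (∀ k, hi ≤ k → k < plist.length → ¬ plist.getD k 0 < x) →
    (∀ k, k < pvFirstAtLeastLoop plist x lo hi → plist.getD k 0 < x) ∧
    (∀ k, pvFirstAtLeastLoop plist x lo hi ≤ k → k < plist.length → ¬ plist.getD k 0 < x) ∧
    pvFirstAtLeastLoop plist x lo hi ≤ plist.length := by
  intro fuel
  induction fuel with
  | zero =>
    intro lo hi h0 h1 h2 hlo hhi
    rw [pvFirstAtLeastLoop, dif_neg (by omega : ¬ lo < hi)]
    exact ⟨hlo, fun k hk hk2 => hhi k (by omega) hk2, by omega⟩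
  | succ n ih =>
    intro lo hi h0 h1 h2 hlo hhi
    by_cases h : lo < hi
    · rw [pvFirstAtLeastLoop, dif_pos h]
      simp only []
      by_cases hv : plist.getD ((lo + hi) / 2) 0 < x
      · rw [if_pos hv]
        refine ih ((lo + hi) / 2 + 1) hi (by omega) (by omega) h2 ?_ hhi
        intro k hk
        rcases Nat.lt_or_ge k lo with hkl | hkl
        · exact hlo k hkl
        · rcases Nat.lt_or_ge k ((lo + hi) / 2) with hkm | hkm
          · exact lt_trans (hs k ((lo + hi) / 2) hkm (by omega)) hv
          · have : k = (lo + hi) / 2 := by omega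
            rwa [this]
      · rw [if_neg hv]
        refine ih lo ((lo + hi) / 2) (by omega) (by omega) (by omega) hlo ?_
        intro k hk hk2
        rcases Nat.lt_or_ge k hi with hkh | hkh
        · rcases Nat.lt_or_ge ((lo + hi) / 2) k with hkm | hkm
          · exact fun hlt => hv (lt_trans (hs ((lo + hi) / 2) k hkm hk2) hlt)
          · have : k = (lo + hi) / 2 := by omega
            rwa [this]
        · exact hhi k hkh hk2
    · rw [pvFirstAtLeastLoop, dif_neg h]
      exact ⟨hlo, fun k hk hk2 => hhi k (by omega) hk2, by omega⟩

-- the inner while loop is a fold over the ≤ j prefix of the remaining positions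
lemma scan_eq_takeWhile (plist : List Int) (j : Int) :
    ∀ (fuel t : Nat) (d : PySem.Dict Int Int), plist.length - t ≤ fuel →
    pvScan plist j d t
      = ((plist.drop t).takeWhile (fun i => decide (i ≤ j))).foldl
          (fun d i => d.insert (j - i) (d.getD (j - i) 0 + 1)) d := by
  intro fuel
  induction fuel with
  | zero =>
    intro t d hf
    rw [pvScan, dif_neg (by omega : ¬ t < plist.length),
      List.drop_eq_nil_of_le (by omega : plist.length ≤ t)]
    simp
  | succ n ih =>
    intro t d hf
    by_cases h : t < plist.length
    · rw [pvScan, dif_pos h]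
      simp only [List.getD_eq_getElem plist 0 h]
      rw [List.drop_eq_getElem_cons h, List.takeWhile_cons]
      by_cases hij : plist[t] > j
      · rw [if_pos hij, if_neg (by simpa using (by omega : ¬ plist[t] ≤ j))]
        simp
      · rw [if_neg hij, if_pos (by simpa using (by omega : plist[t] ≤ j)), List.foldl_cons]
        exact ih (t + 1) _ (by omega)
    · rw [pvScan, dif_neg h, List.drop_eq_nil_of_le (by omega : plist.length ≤ t)]
      simp

-- on an ascending list whose elements are all ≥ x, the window filter is a takeWhile
lemma filter_band_of_all_ge (x j : Int) :
    ∀ (l : List Int),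
    (∀ k1 k2, k1 < k2 → k2 < l.length → l.getD k1 0 < l.getD k2 0) →
    (∀ k, k < l.length → ¬ l.getD k 0 < x) →
    l.filter (fun i => decide (x ≤ i ∧ i ≤ j)) = l.takeWhile (fun i => decide (i ≤ j)) := by
  intro l
  induction l with
  | nil => intro _ _; rfl
  | cons a l ihl =>
    intro hs hge
    have hax : ¬ a < x := by simpa using hge 0 (by simp)
    rw [List.filter_cons, List.takeWhile_cons]
    by_cases haj : a ≤ j
    · rw [if_pos (by simp; omega), if_pos (by simpa using haj)]
      congr 1
      exact ihl (fun k1 k2 hk hk2 => by simpa using hs (k1 + 1) (k2 + 1) (by omega) (by simpa using hk2))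
        (fun k hk => by simpa using hge (k + 1) (by simpa using hk))
    · rw [if_neg (by simp; omega), if_neg (by simpa using haj)]
      rw [List.filter_eq_nil_iff]
      intro b hb
      obtain ⟨k, hk, rfl⟩ := List.mem_iff_getElem.1 hb
      have : a < l[k] := by
        have hk1 : k + 1 < (a :: l).length := by simpa using hk
        have h' := hs 0 (k + 1) (by omega) hk1
        rw [List.getD_eq_getElem (a :: l) 0 (n := k + 1) hk1] at h'
        simpa using h'
      simp
      omega

-- the window filter of an ascending list is the takeWhile after the binary-search boundary
lemma seg_filter (x j : Int) :
    ∀ (l : List Int) (t : Nat),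
    (∀ k1 k2, k1 < k2 → k2 < l.length → l.getD k1 0 < l.getD k2 0) →
    t ≤ l.length →
    (∀ k, k < t → l.getD k 0 < x) →
    (∀ k, t ≤ k → k < l.length → ¬ l.getD k 0 < x) →
    l.filter (fun i => decide (x ≤ i ∧ i ≤ j)) = (l.drop t).takeWhile (fun i => decide (i ≤ j)) := by
  intro l
  induction l with
  | nil => intro t _ ht _ _; simp at ht; simp [ht]
  | cons a l ihl =>
    intro t hs ht h1 h2
    cases t with
    | zero =>
      rw [List.drop_zero]
      exact filter_band_of_all_ge x j (a :: l) hs (fun k hk => h2 k (by omega) hk)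
    | succ t' =>
      have hax : a < x := by simpa using h1 0 (by omega)
      rw [List.filter_cons, if_neg (by simp; omega), List.drop_succ_cons]
      exact ihl t'
        (fun k1 k2 hk hk2 => by simpa using hs (k1 + 1) (k2 + 1) (by omega) (by simpa using hk2))
        (by simpa using ht)
        (fun k hk => by simpa using h1 (k + 1) (by omega))
        (fun k hk hk2 => by simpa using h2 (k + 1) (by omega) (by simpa using hk2))

-- B's search-and-scan inner loop equals the guarded fold over the whole position list
lemma inner_new_eq_old (plist : List Int) (K j : Int) (d : PySem.Dict Int Int)
    (hs : ∀ k1 k2, k1 < k2 → k2 < plist.length → plist.getD k1 0 < plist.getD k2 0) :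
    pvScan plist j d (pvFirstAtLeast plist (j - K))
      = plist.foldl (fun d i =>
          let start := j - i
          if 0 ≤ start ∧ start ≤ K then d.insert start (d.getD start 0 + 1) else d) d := by
  obtain ⟨h1, h2, h3⟩ := firstAtLeastLoop_spec plist (j - K) hs plist.length 0 plist.length
    (by omega) (by omega) (le_refl _) (fun k hk => by omega) (fun k hk hk2 => by omega)
  rw [pvFirstAtLeast] at *
  rw [scan_eq_takeWhile plist j plist.length _ d (by omega),
    ← seg_filter (j - K) j plist _ hs h3 h1 h2, List.foldl_filter]
  refine PySem.List.foldl_congr_mem _ _ _ _ (fun acc i _ => ?_)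
  simp only [decide_eq_true_eq]
  by_cases hci : j - K ≤ i ∧ i ≤ j
  · rw [if_pos hci, if_pos (by omega : 0 ≤ j - i ∧ j - i ≤ K)]
  · rw [if_neg hci, if_neg (by omega : ¬ (0 ≤ j - i ∧ j - i ≤ K))]

-- the stored position lists are strictly ascending
lemma pos_sorted (g : List Char) (c : Char) :
    ∀ k1 k2, k1 < k2 →
    k2 < ((((PySem.List.enumerate g).foldl
        (fun d ic => d.insert ic.2 (d.getD ic.2 [] ++ [ic.1])) PySem.Dict.empty)).getD c []).length →
    ((((PySem.List.enumerate g).foldl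
        (fun d ic => d.insert ic.2 (d.getD ic.2 [] ++ [ic.1])) PySem.Dict.empty)).getD c []).getD k1 0
      < ((((PySem.List.enumerate g).foldl
        (fun d ic => d.insert ic.2 (d.getD ic.2 [] ++ [ic.1])) PySem.Dict.empty)).getD c []).getD k2 0 := by
  intro k1 k2 hk hk2
  rw [pos_getD] at *
  have hp : (((PySem.List.enumerate g).filter (fun ic => ic.2 == c)).map (fun ic => ic.1)).Pairwise (· < ·) :=
    (List.pairwise_map).2 ((PySem.List.pairwise_lt_enumerate g 0).filter _)
  have := (List.pairwise_iff_getElem).1 hp k1 k2 (by omega) hk2 hk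
  rwa [List.getD_eq_getElem _ 0 (by omega), List.getD_eq_getElem _ 0 hk2]

-- B's counting pass equals the guarded-full-scan counting pass
lemma counts_new_eq_old (g r : List Char) (M : Int) :
    ((PySem.List.enumerate r).foldl
        (fun d jc =>
          let plist := (((PySem.List.enumerate g).foldl
              (fun d ic => d.insert ic.2 (d.getD ic.2 [] ++ [ic.1])) PySem.Dict.empty)).getD jc.2 []
          pvScan plist jc.1 d (pvFirstAtLeast plist (jc.1 - M)))
        PySem.Dict.empty)
      = ((PySem.List.enumerate r).foldl
        (fun d jc =>
          ((((PySem.List.enumerate g).foldl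
              (fun d ic => d.insert ic.2 (d.getD ic.2 [] ++ [ic.1])) PySem.Dict.empty)).getD jc.2 []).foldl
            (fun d i =>
              let start := jc.1 - i
              if 0 ≤ start ∧ start ≤ M then d.insert start (d.getD start 0 + 1) else d)
            d)
        PySem.Dict.empty) := by
  refine PySem.List.foldl_congr_mem _ _ _ _ (fun acc jc _ => ?_)
  exact inner_new_eq_old _ M jc.1 acc (pos_sorted g jc.2)

-- ===== VERDICT (by name: the statement is the Claim_ definition above) =====
theorem find_best_alignment_spec : Claim_equal_find_best_alignment := by
  intro gene_seq read_seq _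
  unfold Spec_find_best_alignment find_best_alignment find_best_alignment_alt
  simp only []
  by_cases hlt : (read_seq.toList.length < gene_seq.toList.length)
  · rw [if_pos hlt, if_pos hlt]
  · rw [if_neg hlt, if_neg hlt]
    rw [counts_new_eq_old gene_seq.toList read_seq.toList
      ((read_seq.toList.length : Int) - (gene_seq.toList.length : Int))]
    refine PySem.List.foldl_congr_mem _ _ _ _ ?_
    intro acc x hx
    rw [PySem.List.mem_pyRange_one] at hx
    rw [counts_eq_score gene_seq.toList read_seq.toList x hx.1 (by omega)]
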